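-- pv_equiv track=rewrite | github.com/JiWoo-Yoo/BOJ_Algorithm | 프로그래머스/5/49190. 방의 개수/방의 개수.py | solution
-- ===== SOURCE A (Python) =====
-- from collections import defaultdict
--
-- def solution(arrows):
--     rooms = 0
--     dx = [0, 1, 1, 1, 0, -1, -1, -1]
--     dy = [1, 1, 0, -1, -1, -1, 0, 1]
--     x, y = 0, 0
--     path = defaultdict(list)
--
--     for arrow in arrows:
--         for i in range(2):  # 대각선 겹침을 위해 1씩 두번 이동
--             nx, ny = x + dx[arrow], y + dy[arrow]  # 화살표 방향 위치 확인
--             if (nx, ny) in path:  # 방문했던 점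
--                 if (x, y) not in path[(nx, ny)]:  # 경로 안겹침
--                     rooms += 1  # 방 생김(사이클)
--                     path[(x, y)].append((nx, ny))
--                     path[(nx, ny)].append((x, y))
--             else:  # 방문 안한 점
--                 path[(x, y)].append((nx, ny))
--                 path[(nx, ny)].append((x, y))
--
--             x, y = nx, ny  # 화살표 방향으로 이동
--
--     return rooms
-- ===== SOURCE B (Python) =====
-- def solution(arrows):
--     dx = [0, 1, 1, 1, 0, -1, -1, -1]
--     dy = [1, 1, 0, -1, -1, -1, 0, 1]
--     x, y = 0, 0
--     points = set()
--     edges = set()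
--     for arrow in arrows:
--         for _ in range(2):
--             nx, ny = x + dx[arrow], y + dy[arrow]
--             points.add((x, y))
--             points.add((nx, ny))
--             e = ((x, y), (nx, ny)) if (x, y) < (nx, ny) else ((nx, ny), (x, y))
--             edges.add(e)
--             x, y = nx, ny
--     return len(edges) - len(points) + 1 if edges else 0
-- ===== Notes on version B (the rewrite author's own statement) =====
-- stated objective: simpler
-- what changed: Instead of detecting each newly-closed cycle with an adjacency-list dict and an inner membership scan, B just collects the set of visited points and the set of distinct undirected edges during the same walk and returns the cyclomatic number |E| - |V| + 1 of the (connected) traced graph, or 0 when no edge was drawn.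
import Mathlib
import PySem

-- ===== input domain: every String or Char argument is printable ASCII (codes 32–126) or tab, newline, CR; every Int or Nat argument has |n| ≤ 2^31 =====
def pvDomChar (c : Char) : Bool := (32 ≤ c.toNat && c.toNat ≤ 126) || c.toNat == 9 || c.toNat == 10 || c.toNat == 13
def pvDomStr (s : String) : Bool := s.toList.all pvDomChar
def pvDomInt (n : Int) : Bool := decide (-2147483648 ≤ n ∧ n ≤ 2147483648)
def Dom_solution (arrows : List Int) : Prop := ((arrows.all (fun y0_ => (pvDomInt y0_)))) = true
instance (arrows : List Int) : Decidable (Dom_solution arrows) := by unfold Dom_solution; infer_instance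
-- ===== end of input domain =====

-- B replaces A's incremental cycle detection (adjacency-list dict + inner membership scan) by
-- collecting the visited-point set and undirected-edge set of the same walk and returning
-- |E| - |V| + 1 (0 when no edge was drawn): simpler counting via the cyclomatic number.


-- ===== PORT A =====
def dxT : List Int := [0, 1, 1, 1, 0, -1, -1, -1]
def dyT : List Int := [1, 1, 0, -1, -1, -1, 0, 1]

-- defaultdict(list) append of v at key k (creates the key if absent), exact
def appendAt (path : PySem.Dict (Int × Int) (List (Int × Int))) (k v : Int × Int) :
    PySem.Dict (Int × Int) (List (Int × Int)) :=
  path.insert k (path.getD k [] ++ [v])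

-- one unit step of A's walk; an out-of-range arrow (Python IndexError) is excluded by Pre_solution
def stepA (d : Int) (s : (Int × Int) × Int × PySem.Dict (Int × Int) (List (Int × Int))) :
    (Int × Int) × Int × PySem.Dict (Int × Int) (List (Int × Int)) :=
  let p := s.1
  let rooms := s.2.1
  let path := s.2.2
  let np : Int × Int := (p.1 + PySem.List.pyGetD dxT d 0, p.2 + PySem.List.pyGetD dyT d 0)
  if path.contains np then
    if p ∈ path.getD np [] then (np, rooms, path)
    else (np, rooms + 1, appendAt (appendAt path p np) np p)
  else
    (np, rooms, appendAt (appendAt path p np) np p)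

def solution (arrows : List Int) : Int :=
  (arrows.foldl (fun s a => stepA a (stepA a s)) (((0 : Int), (0 : Int)), (0 : Int), PySem.Dict.empty)).2.1

-- ===== PORT B =====
-- Python tuple comparison (x, y) < (nx, ny)
def pltB (p q : Int × Int) : Bool := p.1 < q.1 || (p.1 == q.1 && p.2 < q.2)
def canon (p q : Int × Int) : (Int × Int) × (Int × Int) := if pltB p q then (p, q) else (q, p)

def stepB (d : Int) (s : (Int × Int) × PySem.Set (Int × Int) × PySem.Set ((Int × Int) × (Int × Int))) :
    (Int × Int) × PySem.Set (Int × Int) × PySem.Set ((Int × Int) × (Int × Int)) :=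
  let p := s.1
  let pts := s.2.1
  let eds := s.2.2
  let np : Int × Int := (p.1 + PySem.List.pyGetD dxT d 0, p.2 + PySem.List.pyGetD dyT d 0)
  (np, (pts.add p).add np, eds.add (canon p np))

def solution_alt (arrows : List Int) : Int :=
  let s := arrows.foldl (fun s a => stepB a (stepB a s))
      (((0 : Int), (0 : Int)), PySem.Set.empty, PySem.Set.empty)
  if s.2.2 ≠ [] then (s.2.2.length : Int) - (s.2.1.length : Int) + 1 else 0

-- ===== PRECONDITION & SPEC =====
-- Pre_ excludes exactly the inputs on which the Python A raises IndexError (dx[arrow] with arrow outside -8..7).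
def Pre_solution (arrows : List Int) : Prop := ∀ a ∈ arrows, -8 ≤ a ∧ a < 8
instance (arrows : List Int) : Decidable (Pre_solution arrows) := by unfold Pre_solution; infer_instance

def pvWitness_solution : List Int := [6, 6, 6, 4, 4, 4, 2, 2, 2, 0, 0, 0, 1, 6, 5, 5, 3, -8, 0]

def Spec_solution (arrows : List Int) (out : Int) : Prop := out = solution_alt arrows
instance (arrows : List Int) (out : Int) : Decidable (Spec_solution arrows out) := by unfold Spec_solution; infer_instance

-- ===== CLAIM (what is proved, stated in full; the proofs are below) =====
def Claim_equal_solution : Prop := ∀ (arrows : List Int), Dom_solution arrows → Pre_solution arrows → Spec_solution arrows (solution arrows)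

-- ===== LEMMAS AND PROOFS =====

theorem contains_appendAt2 (path : PySem.Dict (Int × Int) (List (Int × Int))) (p np q : Int × Int) :
    (appendAt (appendAt path p np) np p).contains q = true ↔
      (q = np ∨ q = p ∨ path.contains q = true) := by
  simp [appendAt, PySem.Dict.contains_insert]

theorem getD_appendAt2 (path : PySem.Dict (Int × Int) (List (Int × Int))) (p np q : Int × Int)
    (hne : p ≠ np) :
    (appendAt (appendAt path p np) np p).getD q [] =
      if q = np then path.getD np [] ++ [p]
      else if q = p then path.getD p [] ++ [np]
      else path.getD q [] := by
  simp only [appendAt, PySem.Dict.getD_insert]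
  split_ifs with h1 h2 <;> simp_all

theorem canon_comm (p q : Int × Int) : canon p q = canon q p := by
  obtain ⟨a, b⟩ := p; obtain ⟨c, d⟩ := q
  simp only [canon, pltB, Bool.or_eq_true, Bool.and_eq_true, beq_iff_eq, decide_eq_true_eq]
  split_ifs with h1 h2 h2 <;> simp_all [Prod.ext_iff] <;> omega

theorem pltB_canon (p q : Int × Int) (hne : p ≠ q) : pltB (canon p q).1 (canon p q).2 = true := by
  obtain ⟨a, b⟩ := p; obtain ⟨c, d⟩ := q
  simp only [canon, pltB, Bool.or_eq_true, Bool.and_eq_true, beq_iff_eq, decide_eq_true_eq]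
  simp only [Prod.ext_iff, ne_eq] at hne
  split_ifs with h1 <;> simp_all <;> omega

theorem canon_eq_iff (p np q r : Int × Int) (hne : p ≠ np) :
    canon q r = canon p np ↔ (q = p ∧ r = np) ∨ (q = np ∧ r = p) := by
  constructor
  · intro h
    unfold canon at h
    split_ifs at h <;> rw [Prod.ext_iff] at h <;>
      first | exact Or.inl ⟨h.1, h.2⟩ | exact Or.inr ⟨h.1, h.2⟩ | exact Or.inl ⟨h.2, h.1⟩ | exact Or.inr ⟨h.2, h.1⟩
  · rintro (⟨rfl, rfl⟩ | ⟨rfl, rfl⟩)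
    · rfl
    · exact canon_comm q r

-- the edge-set ↔ adjacency-dict correspondence survives drawing the edge (p, np)

theorem edgechar_step (path : PySem.Dict (Int × Int) (List (Int × Int)))
    (eds : PySem.Set ((Int × Int) × (Int × Int))) (p np : Int × Int) (hne : p ≠ np)
    (hedge : ∀ q r, r ∈ path.getD q [] ↔ canon q r ∈ eds) (q r : Int × Int) :
    r ∈ (appendAt (appendAt path p np) np p).getD q [] ↔ canon q r ∈ eds.add (canon p np) := by
  rw [getD_appendAt2 path p np q hne, PySem.Set.mem_add]
  have hpn : canon q r = canon p np ↔ (q = p ∧ r = np) ∨ (q = np ∧ r = p) := canon_eq_iff p np q r hne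
  split_ifs with h1 h2 <;> subst_eqs <;> simp [List.mem_append, hedge, hpn] <;> tauto

theorem noKeys (path : PySem.Dict (Int × Int) (List (Int × Int)))
    (eds : PySem.Set ((Int × Int) × (Int × Int)))
    (hedge : ∀ q r, r ∈ path.getD q [] ↔ canon q r ∈ eds)
    (hne7 : ∀ q, path.contains q = true → path.getD q [] ≠ [])
    (hempty : eds = []) (q : Int × Int) : path.contains q = false := by
  by_contra hq
  have hq' : path.contains q = true := by simpa using hq
  obtain ⟨r, hr⟩ := List.exists_mem_of_ne_nil _ (hne7 q hq')
  have := (hedge q r).1 hr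
  simp [hempty] at this

def CoupInv (sA : (Int × Int) × Int × PySem.Dict (Int × Int) (List (Int × Int)))
    (sB : (Int × Int) × PySem.Set (Int × Int) × PySem.Set ((Int × Int) × (Int × Int))) : Prop :=
  sB.1 = sA.1 ∧
  (∀ q, q ∈ sB.2.1 ↔ sA.2.2.contains q = true) ∧
  (∀ q r, r ∈ sA.2.2.getD q [] ↔ canon q r ∈ sB.2.2) ∧
  (∀ e ∈ sB.2.2, pltB e.1 e.2 = true) ∧
  (sA.2.1 = if sB.2.2 = [] then 0 else (sB.2.2.length : Int) - (sB.2.1.length : Int) + 1) ∧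
  (sA.2.2.contains sA.1 = true ∨ sB.2.2 = []) ∧
  (∀ q, sA.2.2.contains q = true → sA.2.2.getD q [] ≠ []) ∧
  (∀ q r, r ∈ sA.2.2.getD q [] → sA.2.2.contains r = true)

theorem step_delta_ne (d : Int) (h1 : -8 ≤ d) (h2 : d < 8) :
    ¬(PySem.List.pyGetD dxT d 0 = 0 ∧ PySem.List.pyGetD dyT d 0 = 0) := by
  interval_cases d <;> decide

theorem inv_step (d : Int) (h1 : -8 ≤ d) (h2 : d < 8)
    (sA : (Int × Int) × Int × PySem.Dict (Int × Int) (List (Int × Int)))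
    (sB : (Int × Int) × PySem.Set (Int × Int) × PySem.Set ((Int × Int) × (Int × Int)))
    (h : CoupInv sA sB) : CoupInv (stepA d sA) (stepB d sB) := by
  obtain ⟨pA, rooms, path⟩ := sA
  obtain ⟨p, pts, eds⟩ := sB
  obtain ⟨hpos, hpts, hedge, hlex, hrooms, hcur, hne7, hmem⟩ := h
  simp only at hpos hpts hedge hlex hrooms hcur hne7 hmem
  subst hpos
  unfold stepA stepB
  simp only
  set np : Int × Int := (p.1 + PySem.List.pyGetD dxT d 0, p.2 + PySem.List.pyGetD dyT d 0) with hnpdef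
  have hpne : p ≠ np := by
    have := step_delta_ne d h1 h2
    rw [hnpdef]
    simp only [ne_eq, Prod.ext_iff, not_and]
    intro hx hy
    exact this ⟨by omega, by omega⟩
  have hkeyE : ∀ q, path.contains q = true → eds ≠ [] := by
    intro q hq he
    rw [noKeys path eds hedge hne7 he q] at hq
    exact absurd hq (by simp)
  have addmemP : ∀ (s : PySem.Set (Int × Int)) (x : Int × Int), x ∈ s → s.add x = s := by
    intro s x hx; simp [PySem.Set.add, hx]
  have addmemE : ∀ (s : PySem.Set ((Int × Int) × (Int × Int))) (x : (Int × Int) × (Int × Int)),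
      x ∈ s → s.add x = s := by
    intro s x hx; simp [PySem.Set.add, hx]
  have addnew : ∀ (s : PySem.Set ((Int × Int) × (Int × Int))) (x : (Int × Int) × (Int × Int)),
      x ∉ s → s.add x = s ++ [x] := by
    intro s x hx; simp [PySem.Set.add, hx]
  have addnewP : ∀ (s : PySem.Set (Int × Int)) (x : Int × Int), x ∉ s → s.add x = s ++ [x] := by
    intro s x hx; simp [PySem.Set.add, hx]
  by_cases hc : path.contains np = true
  · rw [if_pos hc]
    by_cases hmemE : p ∈ path.getD np []
    · -- edge already drawn: nothing changes on either side
      rw [if_pos hmemE]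
      have hpk : path.contains p = true := hmem np p hmemE
      have e1 : (pts.add p).add np = pts := by
        rw [addmemP pts p ((hpts p).2 hpk), addmemP pts np ((hpts np).2 hc)]
      have e2 : eds.add (canon p np) = eds := by
        refine addmemE eds _ ?_
        rw [canon_comm]; exact (hedge np p).1 hmemE
      exact ⟨rfl, by rw [e1]; exact hpts, by rw [e2]; exact hedge,
        by rw [e2]; exact hlex, by rw [e1, e2]; exact hrooms, Or.inl hc, hne7, hmem⟩
    · -- new edge between two visited points: a room closes
      rw [if_neg hmemE]
      have hEne : eds ≠ [] := hkeyE np hc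
      have hpk : path.contains p = true := hcur.resolve_right hEne
      have hcne : canon p np ∉ eds := by
        intro hin
        exact hmemE ((hedge np p).2 (by rw [canon_comm np p]; exact hin))
      refine ⟨rfl, ?_, edgechar_step path eds p np hpne hedge, ?_, ?_, ?_, ?_, ?_⟩
      · intro q
        rw [PySem.Set.mem_add, PySem.Set.mem_add, contains_appendAt2]
        have := hpts q; tauto
      · intro e he
        rcases (PySem.Set.mem_add ..).1 he with he | rfl
        · exact hlex e he
        · exact pltB_canon p np hpne
      · rw [addnew eds _ hcne,
          addmemP pts p ((hpts p).2 hpk), addmemP pts np ((hpts np).2 hc)]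
        rw [if_neg hEne] at hrooms
        simp only [List.length_append, List.length_singleton]
        rw [if_neg (by simp)]
        push_cast
        omega
      · exact Or.inl ((contains_appendAt2 path p np np).2 (Or.inl rfl))
      · intro q hq
        rw [contains_appendAt2] at hq
        rw [getD_appendAt2 path p np q hpne]
        split_ifs with k1 k2 <;> simp_all
      · intro q r hr
        rw [getD_appendAt2 path p np q hpne] at hr
        rw [contains_appendAt2]
        split_ifs at hr with k1 k2
        · rcases List.mem_append.1 hr with hr | hr
          · exact Or.inr (Or.inr (hmem _ _ hr))
          · exact Or.inr (Or.inl (by simpa using hr))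
        · rcases List.mem_append.1 hr with hr | hr
          · exact Or.inr (Or.inr (hmem _ _ hr))
          · exact Or.inl (by simpa using hr)
        · exact Or.inr (Or.inr (hmem _ _ hr))
  · -- np not visited yet: a new point and a new edge, no room
    rw [if_neg hc]
    have hc' : path.contains np = false := by simpa using hc
    have hnpts : np ∉ pts := fun hin => by
      have := (hpts np).1 hin; rw [hc'] at this; exact absurd this (by simp)
    have hcne : canon p np ∉ eds := by
      intro hin
      have := hmem p np ((hedge p np).2 hin)
      rw [hc'] at this; exact absurd this (by simp)
    refine ⟨rfl, ?_, edgechar_step path eds p np hpne hedge, ?_, ?_, ?_, ?_, ?_⟩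
    · intro q
      rw [PySem.Set.mem_add, PySem.Set.mem_add, contains_appendAt2]
      have := hpts q; tauto
    · intro e he
      rcases (PySem.Set.mem_add ..).1 he with he | rfl
      · exact hlex e he
      · exact pltB_canon p np hpne
    · rw [addnew eds _ hcne]
      by_cases hp : path.contains p = true
      · have hEne : eds ≠ [] := hkeyE p hp
        rw [addmemP pts p ((hpts p).2 hp), addnewP pts np hnpts]
        rw [if_neg hEne] at hrooms
        simp only [List.length_append, List.length_singleton]
        rw [if_neg (by simp)]
        push_cast
        omega
      · have hE0 : eds = [] := hcur.resolve_left hp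
        have hpts0 : pts = [] := by
          rw [List.eq_nil_iff_forall_not_mem]
          intro q hq
          have := (hpts q).1 hq
          rw [noKeys path eds hedge hne7 hE0 q] at this
          exact absurd this (by simp)
        subst hE0; subst hpts0
        rw [if_pos rfl] at hrooms
        have e3 : PySem.Set.add (PySem.Set.add ([] : PySem.Set (Int × Int)) p) np = [p, np] := by
          simp [PySem.Set.add, Ne.symm hpne]
        rw [e3, hrooms]
        simp
    · exact Or.inl ((contains_appendAt2 path p np np).2 (Or.inl rfl))
    · intro q hq
      rw [contains_appendAt2] at hq
      rw [getD_appendAt2 path p np q hpne]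
      split_ifs with k1 k2 <;> simp_all
    · intro q r hr
      rw [getD_appendAt2 path p np q hpne] at hr
      rw [contains_appendAt2]
      split_ifs at hr with k1 k2
      · rcases List.mem_append.1 hr with hr | hr
        · exact Or.inr (Or.inr (hmem _ _ hr))
        · exact Or.inr (Or.inl (by simpa using hr))
      · rcases List.mem_append.1 hr with hr | hr
        · exact Or.inr (Or.inr (hmem _ _ hr))
        · exact Or.inl (by simpa using hr)
      · exact Or.inr (Or.inr (hmem _ _ hr))

theorem inv_init : CoupInv (((0 : Int), (0 : Int)), (0 : Int), PySem.Dict.empty)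
    (((0 : Int), (0 : Int)), PySem.Set.empty, PySem.Set.empty) := by
  unfold CoupInv
  simp [PySem.Dict.contains_empty, PySem.Dict.getD_empty, PySem.Set.empty]

theorem inv_fold (arrows : List Int) (hpre : Pre_solution arrows)
    (sA : (Int × Int) × Int × PySem.Dict (Int × Int) (List (Int × Int)))
    (sB : (Int × Int) × PySem.Set (Int × Int) × PySem.Set ((Int × Int) × (Int × Int)))
    (h : CoupInv sA sB) :
    CoupInv (arrows.foldl (fun s a => stepA a (stepA a s)) sA)
      (arrows.foldl (fun s a => stepB a (stepB a s)) sB) := by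
  induction arrows generalizing sA sB with
  | nil => exact h
  | cons a t ih =>
    have ha := hpre a (by simp)
    exact ih (fun x hx => hpre x (by simp [hx]))
      _ _ (inv_step a ha.1 ha.2 _ _ (inv_step a ha.1 ha.2 _ _ h))

-- ===== VERDICT (by name: the statement is the Claim_ definition above) =====
theorem solution_spec : Claim_equal_solution := by
  intro arrows _ hpre
  unfold Spec_solution solution solution_alt
  have h := inv_fold arrows hpre _ _ inv_init
  obtain ⟨-, -, -, -, h5, -⟩ := h
  rw [h5]
  split <;> simp_all
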